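-- pv_equiv track=rewrite | github.com/iseufsif/cryptoanalysis | helpers.py | enumerateWord
-- ===== SOURCE A (Python) =====
-- def enumerateWord(word):
--     encountered = {}
--     numbered_word = ''
--     for char in word:
--         if char not in encountered:
--             encountered[char] = len(encountered)
--
--         numbered_word += (str(encountered[char]) + ".")
--
--     numbered_word = numbered_word[:-1]
--     return numbered_word
-- ===== SOURCE B (Python) =====
-- def enumerateWord(word):
--     # Each character's id is computed independently as a closed form:
--     # the number of distinct characters strictly before its first occurrence.
--     return '.'.join(str(len(set(word[:word.index(c)]))) for c in word)
-- ===== Notes on version B (the rewrite author's own statement) =====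
-- stated objective: alternative
-- what changed: Drops A's incremental id-dictionary and running string entirely: each character's id is computed independently as a closed form, the number of distinct characters before its first occurrence (len(set(word[:word.index(c)]))), then the ids are dot-joined.
import Mathlib
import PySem

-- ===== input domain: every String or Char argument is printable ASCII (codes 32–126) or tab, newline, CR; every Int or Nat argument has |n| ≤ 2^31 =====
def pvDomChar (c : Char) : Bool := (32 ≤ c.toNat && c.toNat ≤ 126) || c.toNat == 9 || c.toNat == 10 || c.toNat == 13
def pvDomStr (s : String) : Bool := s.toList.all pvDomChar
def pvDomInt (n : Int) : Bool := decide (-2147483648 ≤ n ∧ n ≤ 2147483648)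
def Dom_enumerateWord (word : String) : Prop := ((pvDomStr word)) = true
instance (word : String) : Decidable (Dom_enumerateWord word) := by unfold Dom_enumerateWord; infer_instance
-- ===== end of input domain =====

-- B drops A's incremental id-dictionary and running string: each character's id is computed
-- independently as len(set(word[:word.index(c)])) and the ids are dot-joined; objective: alternative.

-- ===== PORT A =====
-- one loop iteration: dict update, then append str(id) + "." to the accumulated string (as List Char)
def enumerateWordStep (st : PySem.Dict Char Int × List Char) (c : Char) :
    PySem.Dict Char Int × List Char :=
  let enc := if st.1.contains c then st.1 else st.1.insert c (st.1.size : Int)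
  -- Python's encountered[char] never misses here (the key was just ensured); getD 0 is exact on these states
  (enc, st.2 ++ PySem.Int.toChars (enc.getD c 0) ++ ['.'])

def enumerateWord (word : String) : String :=
  let st := word.toList.foldl enumerateWordStep (PySem.Dict.empty, [])
  String.ofList (PySem.List.slice st.2 none (some (-1)))   -- numbered_word[:-1]

-- ===== PORT B =====
def enumerateWord_alt (word : String) : String :=
  let L := word.toList
  -- '.'.join(str(len(set(word[:word.index(c)]))) for c in word)
  -- word.index(c) never raises here: every c comes from word itself, so index? is some
  PySem.Str.join "." (L.map (fun c =>
    PySem.Int.toStr (((PySem.Set.ofList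
      (PySem.List.slice L none ((PySem.List.index? L c).map Int.ofNat))).length : Int))))

-- ===== PRECONDITION & SPEC =====
def Spec_enumerateWord (word : String) (out : String) : Prop := out = enumerateWord_alt word
instance (word : String) (out : String) : Decidable (Spec_enumerateWord word out) := by unfold Spec_enumerateWord; infer_instance

-- ===== CLAIM (what is proved, stated in full; the proofs are below) =====
def Claim_equal_enumerateWord : Prop := ∀ (word : String), Dom_enumerateWord word → Spec_enumerateWord word (enumerateWord word)

-- ===== LEMMAS AND PROOFS =====

-- Set.update only appends: the old set is a prefix of the updated one
theorem pv_update_append (rest : List Char) (s : PySem.Set Char) :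
    ∃ t, PySem.Set.update s rest = s ++ t := by
  induction rest generalizing s with
  | nil => exact ⟨[], by simp [PySem.Set.update_nil]⟩
  | cons x xs ih =>
    rw [PySem.Set.update_cons]
    by_cases hx : x ∈ s
    · rw [PySem.Set.add_of_mem hx]; exact ih s
    · rw [PySem.Set.add_of_not_mem hx]
      rcases ih (s ++ [x]) with ⟨t, ht⟩
      exact ⟨x :: t, by simpa using ht⟩

-- a fresh character c gets index = number of distinct chars before it
theorem pv_idx_new (pre rest : List Char) (c : Char) (hc : c ∉ pre) :
    List.idxOf c (PySem.List.dedup (pre ++ c :: rest)) = (PySem.List.dedup pre).length := by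
  have h1 : PySem.List.dedup (pre ++ c :: rest)
      = PySem.Set.update (PySem.List.dedup pre ++ [c]) rest := by
    simp only [PySem.List.dedup_eq_ofList, PySem.Set.ofList_append, PySem.Set.update_cons]
    rw [PySem.Set.add_of_not_mem (by simpa [PySem.Set.mem_ofList] using hc)]
  rcases pv_update_append rest (PySem.List.dedup pre ++ [c]) with ⟨t, ht⟩
  have hnm : c ∉ PySem.List.dedup pre := by
    simpa [PySem.List.dedup_eq_ofList, PySem.Set.mem_ofList] using hc
  rw [h1, ht, List.append_assoc, List.idxOf_append_of_notMem hnm]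
  simp

-- a character already seen keeps the dedup of the prefix unchanged
theorem pv_dedup_append_mem (pre : List Char) (c : Char) (hc : c ∈ pre) :
    PySem.List.dedup (pre ++ [c]) = PySem.List.dedup pre := by
  simp only [PySem.List.dedup_eq_ofList, PySem.Set.ofList_append_singleton]
  exact PySem.Set.add_of_mem (by simpa [PySem.Set.mem_ofList] using hc)

theorem pv_dedup_append_not_mem (pre : List Char) (c : Char) (hc : c ∉ pre) :
    PySem.List.dedup (pre ++ [c]) = PySem.List.dedup pre ++ [c] := by
  simp only [PySem.List.dedup_eq_ofList, PySem.Set.ofList_append_singleton]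
  exact PySem.Set.add_of_not_mem (by simpa [PySem.Set.mem_ofList] using hc)

-- A's loop invariant: dict = first-occurrence indices of the chars of the processed prefix
theorem pv_loopA (L : List Char) :
    ∀ (rest pre : List Char) (d : PySem.Dict Char Int) (acc : List Char),
    pre ++ rest = L →
    (∀ c, d.get? c = if c ∈ pre then some ((List.idxOf c (PySem.List.dedup L) : Int)) else none) →
    d.size = (PySem.List.dedup pre).length →
    (rest.foldl enumerateWordStep (d, acc)).2
      = acc ++ rest.flatMap
          (fun c => PySem.Int.toChars ((List.idxOf c (PySem.List.dedup L) : Int)) ++ ['.']) := by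
  intro rest
  induction rest with
  | nil => intro pre d acc _ _ _; simp
  | cons c cs ih =>
    intro pre d acc hL hd hs
    have hcont : d.contains c = decide (c ∈ pre) := by
      rw [PySem.Dict.contains_eq_isSome_get?, hd c]
      by_cases h : c ∈ pre <;> simp [h]
    by_cases hc : c ∈ pre
    · -- seen before: dict unchanged
      have hstep : enumerateWordStep (d, acc) c
          = (d, acc ++ PySem.Int.toChars ((List.idxOf c (PySem.List.dedup L) : Int)) ++ ['.']) := by
        simp only [enumerateWordStep, hcont, hc, decide_true, if_true]
        rw [PySem.Dict.getD_eq_get?_getD, hd c]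
        simp [hc]
      rw [List.foldl_cons, hstep,
        ih (pre ++ [c]) d _ (by simpa using hL)
          (fun c' => by rw [hd c']; by_cases h : c' ∈ pre <;> by_cases h2 : c' = c <;>
            simp_all)
          (by rw [hs, pv_dedup_append_mem pre c hc])]
      simp
    · -- new char: insert with id = current size
      have hidx : ((d.size : Int)) = ((List.idxOf c (PySem.List.dedup L) : Int)) := by
        have := pv_idx_new pre cs c hc
        rw [hL] at this
        rw [hs, this]
      have hstep : enumerateWordStep (d, acc) c
          = (d.insert c (d.size : Int),
             acc ++ PySem.Int.toChars ((List.idxOf c (PySem.List.dedup L) : Int)) ++ ['.']) := by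
        simp only [enumerateWordStep, hcont, hc, decide_false, Bool.false_eq_true, if_false]
        rw [PySem.Dict.getD_eq_get?_getD, PySem.Dict.get?_insert_self, hidx]
        simp
      rw [List.foldl_cons, hstep,
        ih (pre ++ [c]) _ _ (by simpa using hL)
          (fun c' => by
            by_cases h2 : c' = c
            · subst h2; rw [PySem.Dict.get?_insert_self, hidx]; simp
            · rw [PySem.Dict.get?_insert_of_ne _ _ h2, hd c']
              by_cases h : c' ∈ pre <;> simp_all)
          (by
            rw [PySem.Dict.size_insert, hcont, pv_dedup_append_not_mem pre c hc]
            simp [hc, hs])]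
      simp

-- B's closed form equals the first-occurrence index in the ordered dedup
theorem pv_closedB (L : List Char) (c : Char) (hc : c ∈ L) :
    (PySem.Set.ofList (PySem.List.slice L none ((PySem.List.index? L c).map Int.ofNat))).length
      = List.idxOf c (PySem.List.dedup L) := by
  obtain ⟨i, hi⟩ := Option.isSome_iff_exists.mp ((PySem.List.index?_isSome_iff (xs := L) (v := c)).mpr hc)
  obtain ⟨pre, suf, hLeq, hlen, hnm⟩ := (PySem.List.index?_eq_some_iff L c i).mp hi
  rw [hi]
  simp only [Option.map_some, Int.ofNat_eq_natCast]
  rw [PySem.List.slice_to_natCast]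
  subst hlen
  rw [hLeq, List.take_left]
  rw [pv_idx_new pre suf c hnm]
  simp [PySem.List.dedup_eq_ofList]

-- dropping the trailing '.' of the concatenation is the '.'-join
theorem pv_join_dot (parts : List (List Char)) :
    (parts.flatMap (fun p => p ++ ['.'])).dropLast = PySem.Chars.join ['.'] parts := by
  induction parts with
  | nil => simp [PySem.Chars.join_nil]
  | cons p rest ih =>
    cases rest with
    | nil => simp [PySem.Chars.join_singleton]
    | cons q rest' =>
      have hne : ((q :: rest').flatMap (fun p => p ++ ['.'])) ≠ [] := by simp
      rw [List.flatMap_cons, List.dropLast_append_of_ne_nil hne, ih,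
        PySem.Chars.join_cons_cons]

-- ===== VERDICT (by name: the statement is the Claim_ definition above) =====
theorem enumerateWord_spec : Claim_equal_enumerateWord := by
  intro word _
  unfold Spec_enumerateWord enumerateWord enumerateWord_alt
  set L := word.toList with hLdef
  have hA := pv_loopA L L [] PySem.Dict.empty [] (by simp)
    (fun c => by simp [PySem.Dict.get?_empty])
    (by simp [PySem.Dict.size_empty, PySem.List.dedup_eq_ofList, PySem.Set.ofList_nil])
  rw [← String.toList_inj]
  simp only [hA, List.nil_append, PySem.List.slice_to_neg_one, String.toList_ofList]
  have hflat : L.flatMap (fun c => PySem.Int.toChars ((List.idxOf c (PySem.List.dedup L) : Int)) ++ ['.'])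
      = (L.map (fun c => PySem.Int.toChars ((List.idxOf c (PySem.List.dedup L) : Int)))).flatMap
          (fun p => p ++ ['.']) := by
    rw [List.flatMap_map]
  rw [hflat, pv_join_dot]
  have hjoin : (PySem.Str.join "." (L.map (fun c => PySem.Int.toStr
      (((PySem.Set.ofList
        (PySem.List.slice L none ((PySem.List.index? L c).map Int.ofNat))).length : Int))))).toList
      = PySem.Chars.join ['.'] ((L.map (fun c => PySem.Int.toStr
      (((PySem.Set.ofList
        (PySem.List.slice L none ((PySem.List.index? L c).map Int.ofNat))).length : Int)))).map String.toList) := by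
    simp [PySem.Str.toList_join]
  rw [hjoin]
  congr 1
  rw [List.map_map]
  apply List.map_congr_left
  intro c hcL
  simp only [Function.comp_def, PySem.Int.toList_toStr]
  rw [pv_closedB L c hcL]
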